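-- pv_equiv track=rewrite | github.com/satwik77/Mogrifier-LSTM | src/utils/sentence_processing.py | sort_by_len
-- ===== SOURCE A (Python) =====
-- def sort_by_len(sents, labels):
-- 	orig_idx = range(len(sents))
--
-- 	# Index by which sorting needs to be done
-- 	sorted_idx = sorted(orig_idx, key=lambda k: len(sents[k]), reverse=True)
-- 	seq_pairs = list(zip(sents, labels))
-- 	seq_pairs = [seq_pairs[i] for i in sorted_idx]
--
-- 	# For restoring original order
-- 	orig_idx = sorted(orig_idx, key=lambda k: sorted_idx[k])
-- 	sents, labels = [s[0] for s in seq_pairs], [s[1] for s in seq_pairs]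
--
-- 	return sents, labels, orig_idx
-- ===== SOURCE B (Python) =====
-- def sort_by_len(sents, labels):
--     n = len(sents)
--     # descending-length order, stable like A's
--     sorted_idx = sorted(range(n), key=lambda k: len(sents[k]), reverse=True)
--     sents = [sents[i] for i in sorted_idx]
--     labels = [labels[i] for i in sorted_idx]
--     # inverse permutation by a direct O(n) fill instead of a second sort
--     orig_idx = [0] * n
--     for pos, i in enumerate(sorted_idx):
--         orig_idx[i] = pos
--     return sents, labels, orig_idx
-- ===== Notes on version B (the rewrite author's own statement) =====
-- stated objective: simpler
-- what changed: B reorders sents and labels directly by sorted_idx instead of zipping into pairs, and computes the restore indices by an O(n) inverse-permutation fill (orig_idx[i]=pos) instead of A's second sort of range(n) keyed by sorted_idx.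
-- outside the precondition, e.g. on sort_by_len([[1], [2, 3]], [7]): A raises IndexError, B raises IndexError
import Mathlib
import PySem

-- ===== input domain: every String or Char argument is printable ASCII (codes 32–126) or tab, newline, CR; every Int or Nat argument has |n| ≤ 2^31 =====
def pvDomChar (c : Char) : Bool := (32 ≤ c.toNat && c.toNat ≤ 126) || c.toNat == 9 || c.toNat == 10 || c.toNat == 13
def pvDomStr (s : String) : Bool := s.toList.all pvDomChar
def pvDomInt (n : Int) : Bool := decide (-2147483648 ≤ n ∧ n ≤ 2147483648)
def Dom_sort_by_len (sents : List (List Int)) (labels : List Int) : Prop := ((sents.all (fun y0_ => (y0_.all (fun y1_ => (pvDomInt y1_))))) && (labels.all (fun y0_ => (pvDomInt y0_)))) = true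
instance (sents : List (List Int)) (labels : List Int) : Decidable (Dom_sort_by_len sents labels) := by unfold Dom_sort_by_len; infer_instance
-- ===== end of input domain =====

-- B replaces A's zip/unzip reordering and its second sort (inverting the permutation by
-- sorting range(n) keyed by sorted_idx) with direct index maps and an O(n) inverse-permutation
-- fill; objective: simpler.

-- ===== PORT A =====
def sort_by_len (sents : List (List Int)) (labels : List Int) : List (List Int) × List Int × List Int :=
  let origIdx := PySem.List.pyRange 0 (sents.length : Int) 1
  let sortedIdx := PySem.List.sorted origIdx (fun k => ((PySem.List.pyGetD sents k []).length : Int)) true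
  let seqPairs := sents.zip labels
  let seqPairs2 := sortedIdx.map (fun i => PySem.List.pyGetD seqPairs i ([], 0))
  let origIdx2 := PySem.List.sorted origIdx (fun k => PySem.List.pyGetD sortedIdx k 0) false
  (seqPairs2.map Prod.fst, seqPairs2.map Prod.snd, origIdx2)

-- ===== PORT B =====
def sort_by_len_alt (sents : List (List Int)) (labels : List Int) : List (List Int) × List Int × List Int :=
  let n := sents.length
  let sortedIdx := PySem.List.sorted (PySem.List.pyRange 0 (n : Int) 1) (fun k => ((PySem.List.pyGetD sents k []).length : Int)) true
  let sents' := sortedIdx.map (fun i => PySem.List.pyGetD sents i [])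
  let labels' := sortedIdx.map (fun i => PySem.List.pyGetD labels i 0)
  -- for pos, i in enumerate(sorted_idx): orig_idx[i] = pos   (i is always in [0, n))
  let origIdx := (PySem.List.enumerate sortedIdx 0).foldl (fun acc p => acc.set p.2.toNat p.1) (List.replicate n (0 : Int))
  (sents', labels', origIdx)

-- ===== PRECONDITION & SPEC =====
-- Pre_ excludes inputs with fewer labels than sentences: there both A and B raise IndexError
-- (A when indexing the truncated zip, B when indexing labels).
def Pre_sort_by_len (sents : List (List Int)) (labels : List Int) : Prop :=
  sents.length ≤ labels.length
instance (sents : List (List Int)) (labels : List Int) : Decidable (Pre_sort_by_len sents labels) := by unfold Pre_sort_by_len; infer_instance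
def pvWitness_sort_by_len : List (List Int) × List Int := ([[1], [2, 3]], [4, 5])

def Spec_sort_by_len (sents : List (List Int)) (labels : List Int) (out : List (List Int) × List Int × List Int) : Prop := out = sort_by_len_alt sents labels
instance (sents : List (List Int)) (labels : List Int) (out : List (List Int) × List Int × List Int) : Decidable (Spec_sort_by_len sents labels out) := by unfold Spec_sort_by_len; infer_instance

-- ===== CLAIM (what is proved, stated in full; the proofs are below) =====
def Claim_equal_sort_by_len : Prop := ∀ (sents : List (List Int)) (labels : List Int), Dom_sort_by_len sents labels → Pre_sort_by_len sents labels → Spec_sort_by_len sents labels (sort_by_len sents labels)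

-- ===== LEMMAS AND PROOFS =====

-- the fill loop, abstracted for the proofs (definitionally B's foldl)
def pvFill (s : List Int) (start : Int) (acc : List Int) : List Int :=
  (PySem.List.enumerate s start).foldl (fun acc p => acc.set p.2.toNat p.1) acc

lemma pvFill_cons (i : Int) (rest : List Int) (start : Int) (acc : List Int) :
    pvFill (i :: rest) start acc = pvFill rest (start + 1) (acc.set i.toNat start) := by
  simp [pvFill, PySem.List.enumerate_cons]

lemma pvFill_length (s : List Int) (start : Int) (acc : List Int) :
    (pvFill s start acc).length = acc.length := by
  induction s generalizing start acc with
  | nil => rfl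
  | cons i rest ih => rw [pvFill_cons, ih, List.length_set]

lemma pvFill_skip (s : List Int) (start : Int) (acc : List Int) (j : Nat)
    (h : ∀ i ∈ s, i.toNat ≠ j) : (pvFill s start acc)[j]? = acc[j]? := by
  induction s generalizing start acc with
  | nil => rfl
  | cons i rest ih =>
    rw [pvFill_cons, ih _ _ (fun i' hi' => h i' (List.mem_cons_of_mem _ hi'))]
    rw [List.getElem?_set_ne (h i (List.mem_cons_self))]

lemma pvFill_get (s : List Int) (start : Int) (acc : List Int)
    (hnd : s.Nodup) (hnn : ∀ i ∈ s, 0 ≤ i)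
    (p : Nat) (hp : p < s.length) (hlt : (s[p]).toNat < acc.length) :
    (pvFill s start acc)[(s[p]).toNat]? = some (start + (p : Int)) := by
  induction s generalizing start acc p with
  | nil => simp at hp
  | cons i rest ih =>
    rw [pvFill_cons]
    cases p with
    | zero =>
      simp only [List.getElem_cons_zero] at hlt ⊢
      rw [pvFill_skip]
      · rw [List.getElem?_set_self (by simpa using hlt)]
        simp
      · intro i' hi' heq
        have hne : i' ≠ i := fun h => (List.nodup_cons.mp hnd).1 (h ▸ hi')
        have h0 : 0 ≤ i := hnn i (List.mem_cons_self)
        have h0' : 0 ≤ i' := hnn i' (List.mem_cons_of_mem _ hi')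
        omega
    | succ q =>
      simp only [List.getElem_cons_succ] at hlt ⊢
      rw [ih _ _ (List.nodup_cons.mp hnd).2 (fun i' hi' => hnn i' (List.mem_cons_of_mem _ hi'))
            q (by simpa using hp) (by simpa using hlt)]
      congr 1
      push_cast
      ring

theorem sort_by_len_spec_aux (sents : List (List Int)) (labels : List Int)
    (hpre : sents.length ≤ labels.length) :
    sort_by_len sents labels = sort_by_len_alt sents labels := by
  unfold sort_by_len sort_by_len_alt
  simp only []
  set n := sents.length with hn
  set key : Int → Int := fun k => ((PySem.List.pyGetD sents k []).length : Int) with hkey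
  set s := PySem.List.sorted (PySem.List.pyRange 0 (n : Int) 1) key true with hs
  -- facts about s
  have hperm : s.Perm (PySem.List.pyRange 0 (n : Int) 1) := PySem.List.sorted_perm _ _ _
  have hslen : s.length = n := by
    rw [hperm.length_eq, PySem.List.length_pyRange_one]; omega
  have hmem : ∀ i ∈ s, 0 ≤ i ∧ i < (n : Int) := by
    intro i hi
    have := (PySem.List.mem_pyRange_one).mp (hperm.mem_iff.mp hi)
    omega
  have hnd : s.Nodup := hperm.nodup_iff.mpr (PySem.List.nodup_pyRange_one _ _)
  simp only [Prod.mk.injEq]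
  refine ⟨?_, ?_, ?_⟩
  · -- sents component
    rw [List.map_map]
    apply List.map_congr_left
    intro i hi
    obtain ⟨h0, hlt⟩ := hmem i hi
    have hz : (sents.zip labels).length = n := by
      rw [List.length_zip]; omega
    simp only [Function.comp_apply]
    rw [PySem.List.pyGetD_eq_getElem (sents.zip labels) _ h0 (by rw [hz]; omega),
        PySem.List.pyGetD_eq_getElem sents _ h0 (by omega)]
    simp [List.getElem_zip]
  · -- labels component
    rw [List.map_map]
    apply List.map_congr_left
    intro i hi
    obtain ⟨h0, hlt⟩ := hmem i hi
    have hz : (sents.zip labels).length = n := by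
      rw [List.length_zip]; omega
    simp only [Function.comp_apply]
    rw [PySem.List.pyGetD_eq_getElem (sents.zip labels) _ h0 (by rw [hz]; omega),
        PySem.List.pyGetD_eq_getElem labels _ h0 (by omega)]
    simp [List.getElem_zip]
  · -- restore indices
    show _ = pvFill s 0 (List.replicate n (0 : Int))
    set q := pvFill s 0 (List.replicate n (0 : Int)) with hq
    have hqlen : q.length = n := by rw [hq, pvFill_length, List.length_replicate]
    -- q at index s[p] holds p
    have hfill : ∀ (p : Nat) (hp : p < n), q[(s[p]'(by omega)).toNat]? = some (p : Int) := by
      intro p hp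
      have := pvFill_get s 0 (List.replicate n (0 : Int)) hnd
        (fun i hi => (hmem i hi).1) p (by omega)
        (by
          rw [List.length_replicate]
          have := hmem _ (List.getElem_mem (l := s) (n := p) (by omega))
          omega)
      simpa using this
    -- q at index j (as getElem) equals the position of j in s
    have hchar : ∀ (j : Nat) (hj : j < q.length),
        ∃ (p : Nat) (hp : p < n), q[j] = (p : Int) ∧ s[p]'(by omega) = (j : Int) := by
      intro j hj
      have hjm : (j : Int) ∈ s := by
        rw [hperm.mem_iff, PySem.List.mem_pyRange_one]
        constructor
        · positivity
        · rw [hqlen] at hj; exact_mod_cast hj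
      obtain ⟨p, hp, hpe⟩ := List.mem_iff_getElem.mp hjm
      refine ⟨p, by omega, ?_, hpe⟩
      have := hfill p (by omega)
      rw [hpe] at this
      simpa [List.getElem?_eq_getElem hj] using this
    have hpw : q.Pairwise (fun a b => PySem.List.pyGetD s a 0 < PySem.List.pyGetD s b 0) := by
      rw [List.pairwise_iff_getElem]
      intro a b ha hb hab
      obtain ⟨pa, hpa, hqa, hsa⟩ := hchar a ha
      obtain ⟨pb, hpb, hqb, hsb⟩ := hchar b hb
      rw [hqa, hqb,
          PySem.List.pyGetD_eq_getElem _ _ (by positivity) (by rw [hslen]; exact_mod_cast hpa),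
          PySem.List.pyGetD_eq_getElem _ _ (by positivity) (by rw [hslen]; exact_mod_cast hpb)]
      simp only [Int.toNat_natCast]
      rw [hsa, hsb]
      exact_mod_cast hab
    have hqnd : q.Nodup := by
      rw [List.nodup_iff_getElem?_ne_getElem?]
      intro a b hab hb
      obtain ⟨pa, hpa, hqa, hsa⟩ := hchar a (by omega)
      obtain ⟨pb, hpb, hqb, hsb⟩ := hchar b hb
      rw [List.getElem?_eq_getElem (by omega), List.getElem?_eq_getElem hb, hqa, hqb]
      intro h
      have : pa = pb := by exact_mod_cast Option.some_injective _ h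
      subst this
      rw [hsa] at hsb
      have : a = b := by exact_mod_cast hsb
      omega
    have hsub : q ⊆ PySem.List.pyRange 0 (n : Int) 1 := by
      intro x hx
      obtain ⟨j, hj, hje⟩ := List.mem_iff_getElem.mp hx
      obtain ⟨p, hp, hqj, _⟩ := hchar j hj
      rw [← hje, hqj, PySem.List.mem_pyRange_one]
      constructor
      · positivity
      · exact_mod_cast hp
    have hqperm : q.Perm (PySem.List.pyRange 0 (n : Int) 1) :=
      (hqnd.subperm hsub).perm_of_length_le (by rw [hqlen, PySem.List.length_pyRange_one]; omega)
    exact PySem.List.sorted_eq_of_perm_of_pairwise_lt _ _ _ hqperm hpw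

-- ===== VERDICT (by name: the statement is the Claim_ definition above) =====
theorem sort_by_len_spec : Claim_equal_sort_by_len := by
  intro sents labels _ hpre
  exact sort_by_len_spec_aux sents labels hpre
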